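-- pv_equiv track=rewrite | github.com/kiripcha/Algorithms-HSE-x-Avito | HW1/src/max_even_sum.py | max_even_sum
-- ===== SOURCE A (Python) =====
-- def max_even_sum(arr: list[int]) -> int:
--     """
--     Находит максимальную сумму элементов массива, которая делится на 2.
--
--     :param arr: Список целых положительных чисел.
--     :return: Максимальная сумма, делящаяся на 2, или 0, если такой суммы нет.
--     """
--     if not arr:
--         return 0
--
--     max_sum = 0
--     n = len(arr)
--
--     # Перебираем все возможные подмножества, исключая пустое (mask != 0)
--     for mask in range(1, 1 << n):  # Начинаем с 1, чтобы исключить пустое подмножество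
--         current_sum = 0
--         for i in range(n):
--             if mask & (1 << i):  # Если i-й элемент включён в подмножество
--                 current_sum += arr[i]
--         if current_sum % 2 == 0 and current_sum > max_sum:
--             max_sum = current_sum
--
--     return max_sum
-- ===== SOURCE B (Python) =====
-- def max_even_sum(arr: list[int]) -> int:
--     """One pass keeping the best even and best odd subset sum seen so far (empty subset = 0)."""
--     best_even = 0
--     best_odd = None
--     for x in arr:
--         if x % 2 == 0:
--             new_even = max(best_even, best_even + x)
--             new_odd = best_odd if best_odd is None else max(best_odd, best_odd + x)
--         else:
--             new_even = best_even if best_odd is None else max(best_even, best_odd + x)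
--             new_odd = best_even + x if best_odd is None else max(best_even + x, best_odd)
--         best_even = new_even
--         best_odd = new_odd
--     return best_even
-- ===== Notes on version B (the rewrite author's own statement) =====
-- stated objective: faster
-- what changed: Replaced the O(2^n * n) enumeration of all subset bitmasks by a single O(n) pass that keeps only the best even and best odd subset sum seen so far (parity dynamic programming).
import Mathlib
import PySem

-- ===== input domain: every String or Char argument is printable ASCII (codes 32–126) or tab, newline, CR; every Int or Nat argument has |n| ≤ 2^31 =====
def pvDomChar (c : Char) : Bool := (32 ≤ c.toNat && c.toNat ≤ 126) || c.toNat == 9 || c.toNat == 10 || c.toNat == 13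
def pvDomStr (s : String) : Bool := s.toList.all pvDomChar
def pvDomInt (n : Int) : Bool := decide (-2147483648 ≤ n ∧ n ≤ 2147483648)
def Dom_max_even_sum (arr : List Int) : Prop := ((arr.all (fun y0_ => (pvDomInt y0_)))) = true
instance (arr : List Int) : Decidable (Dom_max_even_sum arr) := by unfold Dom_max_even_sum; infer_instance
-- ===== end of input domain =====

-- B replaces A's O(2^n·n) enumeration of all subset bitmasks by one linear pass keeping
-- the best even and best odd subset sum (parity DP); measured asymptotically faster.


-- ===== PORT A =====
-- 'for mask in range(1, 1 << n)' / 'for i in range(n)'; 'mask & (1 << i)' truthy ↔ ≠ 0.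
-- i comes from range(0, n), so 0 ≤ i < n: 'i.toNat' as shift amount and 'pyGetD arr i 0'
-- for 'arr[i]' are exact there (no IndexError is reachable).
def max_even_sum (arr : List Int) : Int :=
  if arr = [] then 0
  else
    -- n = len(arr) inlined as arr.length
    (PySem.List.pyRange 1 ((1:Int) <<< arr.length) 1).foldl (fun max_sum mask =>
      let current_sum :=
        (PySem.List.pyRange 0 (arr.length : Int) 1).foldl (fun c i =>
          if PySem.Int.band mask ((1:Int) <<< i.toNat) ≠ 0 then c + PySem.List.pyGetD arr i 0
          else c) 0
      if PySem.Int.mod current_sum 2 = 0 ∧ current_sum > max_sum then current_sum else max_sum) 0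

-- ===== PORT B =====
-- Source B: one pass; state = (best_even, best_odd) with best_odd Optional (None = no odd
-- subset sum exists yet); best_even starts at 0 (the empty subset).
def max_even_sum_alt (arr : List Int) : Int :=
  (arr.foldl (fun (p : Int × Option Int) x =>
      if PySem.Int.mod x 2 = 0 then
        (max p.1 (p.1 + x),
         match p.2 with
         | none => none
         | some m => some (max m (m + x)))
      else
        ((match p.2 with
          | none => p.1
          | some m => max p.1 (m + x)),
         some (match p.2 with
               | none => p.1 + x
               | some m => max (p.1 + x) m)))
    ((0 : Int), (none : Option Int))).1

-- ===== PRECONDITION & SPEC =====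
def Spec_max_even_sum (arr : List Int) (out : Int) : Prop := out = max_even_sum_alt arr
instance (arr : List Int) (out : Int) : Decidable (Spec_max_even_sum arr out) := by unfold Spec_max_even_sum; infer_instance

-- ===== CLAIM (what is proved, stated in full; the proofs are below) =====
def Claim_equal_max_even_sum : Prop := ∀ (arr : List Int), Dom_max_even_sum arr → Spec_max_even_sum arr (max_even_sum arr)

-- ===== LEMMAS AND PROOFS =====

-- sum of the subset of l selected by the bits of the mask m (bit 0 = head)
def pvMsum : List Int → Nat → Int
  | [], _ => 0
  | a :: l, m => (if m % 2 = 1 then a else 0) + pvMsum l (m / 2)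

-- running max, Option = "no candidate yet"
def pvOmax : Option Int → Int → Option Int
  | none, v => some v
  | some m, v => some (max m v)

-- (max even element, max odd element) of a list
def pvMeo : List Int → Option Int × Option Int
  | [] => (none, none)
  | v :: s =>
      let p := pvMeo s
      if v % 2 = 0 then (pvOmax p.1 v, p.2) else (p.1, pvOmax p.2 v)

def pvMerge : Option Int → Option Int → Option Int
  | none, o => o
  | some m, o => pvOmax o m

-- Minkowski combination of two (best even, best odd) states
def pvComb (p q : Int × Option Int) : Int × Option Int :=
  ((match p.2, q.2 with
    | some m, some k => max (p.1 + q.1) (m + k)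
    | _, _ => p.1 + q.1),
   pvMerge (q.2.map (fun v => p.1 + v)) (p.2.map (fun v => v + q.1)))

def pvUnit (a : Int) : Int × Option Int :=
  if a % 2 = 0 then (max 0 a, none) else (0, some a)

-- the intended state of B after scanning l
def pvSem : List Int → Int × Option Int
  | [] => (0, none)
  | a :: l => pvComb (pvUnit a) (pvSem l)

-- all 2^len subset sums, in mask order
def pvSums (l : List Int) : List Int := (List.range (2 ^ l.length)).map (pvMsum l)

def pvOmaxD (c : Int) : Option Int → Int
  | none => c
  | some m => max c m

-- A's accumulation loop over a precomputed list of candidate sums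
def pvG (c : Int) (s : List Int) : Int :=
  s.foldl (fun mx v => if v % 2 = 0 ∧ v > mx then v else mx) c

lemma pvOmax_swap (o : Option Int) (a b : Int) :
    pvOmax (pvOmax o a) b = pvOmax (pvOmax o b) a := by
  cases o <;> simp [pvOmax] <;> omega

lemma pvOmax_merge (a b : Option Int) (v : Int) :
    pvOmax (pvMerge a b) v = pvMerge (pvOmax a v) b := by
  cases a <;> cases b <;> simp [pvMerge, pvOmax, Int.max_def] <;> (try split_ifs) <;> omega

lemma pvOmax_map (o : Option Int) (a v : Int) :
    pvOmax (o.map (fun w => a + w)) (a + v) = (pvOmax o v).map (fun w => a + w) := by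
  cases o <;> simp [pvOmax]

lemma pvMsum_zero (l : List Int) : pvMsum l 0 = 0 := by
  induction l with
  | nil => rfl
  | cons a l ih => simp [pvMsum, ih]

lemma pvMsum_even (a : Int) (l : List Int) (k : Nat) :
    pvMsum (a :: l) (2 * k) = pvMsum l k := by
  have h1 : 2 * k % 2 = 0 := by omega
  have h2 : 2 * k / 2 = k := by omega
  simp [pvMsum, h1, h2]

lemma pvMsum_odd (a : Int) (l : List Int) (k : Nat) :
    pvMsum (a :: l) (2 * k + 1) = a + pvMsum l k := by
  have h1 : (2 * k + 1) % 2 = 1 := by omega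
  have h2 : (2 * k + 1) / 2 = k := by omega
  simp [pvMsum, h1, h2]

-- the inner 'for i in range(n)' loop computes the mask-selected sum
lemma pvInner : ∀ (l : List Int) (m : Nat) (c : Int),
    (List.range l.length).foldl
      (fun acc k => if m.testBit k then acc + l.getD k 0 else acc) c
    = c + pvMsum l m := by
  intro l
  induction l with
  | nil => intro m c; simp [pvMsum]
  | cons a l ih =>
      intro m c
      have hlen : (a :: l).length = l.length + 1 := rfl
      rw [hlen, List.range_succ_eq_map, List.foldl_cons, List.foldl_map]
      have hfun : (fun (acc : Int) (k : Nat) =>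
            if m.testBit k.succ then acc + (a :: l).getD k.succ 0 else acc)
          = (fun acc k => if (m / 2).testBit k then acc + l.getD k 0 else acc) := by
        funext acc k
        simp [Nat.testBit_add_one]
      rw [hfun, ih (m / 2)]
      have hbit : m.testBit 0 = decide (m % 2 = 1) := by
        simp [Nat.testBit_zero]
      simp only [List.getD_cons_zero, hbit, pvMsum]
      by_cases h : m % 2 = 1 <;> simp [h] <;> omega

lemma pvG_char : ∀ (s : List Int) (c : Int), pvG c s = pvOmaxD c (pvMeo s).1 := by
  intro s
  induction s with
  | nil => intro c; rfl
  | cons v s ih =>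
      intro c
      have hstep : (if v % 2 = 0 ∧ v > c then v else c)
          = if v % 2 = 0 then max c v else c := by
        split_ifs <;> omega
      show pvG (if v % 2 = 0 ∧ v > c then v else c) s = _
      rw [hstep, ih]
      by_cases hv : v % 2 = 0 <;>
        cases h : (pvMeo s).1 <;>
          simp [pvMeo, pvOmax, pvOmaxD, hv, h] <;> omega

-- range(2n) splits into the even and the odd masks
lemma pvRangeSplit : ∀ n : Nat,
    (List.range (2 * n)).Perm
      ((List.range n).map (fun k => 2 * k) ++ (List.range n).map (fun k => 2 * k + 1)) := by
  intro n
  induction n with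
  | zero => simp
  | succ n ih =>
      have h2 : 2 * (n + 1) = 2 * n + 1 + 1 := by ring
      rw [h2, List.range_succ, List.range_succ, List.range_succ,
        List.map_append, List.map_append]
      refine List.Perm.trans (List.Perm.append_right _ (List.Perm.append_right _ ih)) ?_
      simp only [List.map_cons, List.map_nil, List.append_assoc]
      refine List.Perm.append_left _ ?_
      exact List.perm_middle

lemma pvMeo_perm : ∀ {s t : List Int}, s.Perm t → pvMeo s = pvMeo t := by
  intro s t h
  induction h with
  | nil => rfl
  | cons x _ ih => simp [pvMeo, ih]
  | swap x y l =>
      by_cases hx : x % 2 = 0 <;> by_cases hy : y % 2 = 0 <;>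
        simp [pvMeo, hx, hy, pvOmax_swap]
  | trans _ _ ih1 ih2 => rw [ih1, ih2]

lemma pvMeo_append : ∀ s t : List Int,
    pvMeo (s ++ t) = (pvMerge (pvMeo s).1 (pvMeo t).1, pvMerge (pvMeo s).2 (pvMeo t).2) := by
  intro s t
  induction s with
  | nil => simp [pvMeo, pvMerge]
  | cons v s ih =>
      by_cases hv : v % 2 = 0 <;> simp [pvMeo, hv, ih, pvOmax_merge]

lemma pvMeo_map_even (a : Int) (ha : a % 2 = 0) : ∀ s : List Int,
    pvMeo (s.map (fun v => a + v))
      = ((pvMeo s).1.map (fun v => a + v), (pvMeo s).2.map (fun v => a + v)) := by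
  intro s
  induction s with
  | nil => simp [pvMeo]
  | cons v s ih =>
      have hpar : (a + v) % 2 = 0 ↔ v % 2 = 0 := by omega
      by_cases hv : v % 2 = 0 <;>
        simp [pvMeo, hv, hpar, ih, pvOmax_map]

lemma pvMeo_map_odd (a : Int) (ha : a % 2 ≠ 0) : ∀ s : List Int,
    pvMeo (s.map (fun v => a + v))
      = ((pvMeo s).2.map (fun v => a + v), (pvMeo s).1.map (fun v => a + v)) := by
  intro s
  induction s with
  | nil => simp [pvMeo]
  | cons v s ih =>
      have hpar : ((a + v) % 2 = 0) ↔ ¬ (v % 2 = 0) := by omega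
      by_cases hv : v % 2 = 0 <;>
        simp [pvMeo, hv, hpar, ih, pvOmax_map]

lemma pvSums_cons (a : Int) (l : List Int) :
    (pvSums (a :: l)).Perm (pvSums l ++ (pvSums l).map (fun v => a + v)) := by
  have hpow : 2 ^ (a :: l).length = 2 * 2 ^ l.length := by
    simp [List.length_cons, pow_succ]; ring
  have hperm := (pvRangeSplit (2 ^ l.length)).map (pvMsum (a :: l))
  have h1 : (List.map (pvMsum (a :: l)) ((List.range (2 ^ l.length)).map (fun k => 2 * k)))
      = pvSums l := by
    rw [List.map_map]
    exact List.map_congr_left (fun k _ => pvMsum_even a l k)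
  have h2 : (List.map (pvMsum (a :: l)) ((List.range (2 ^ l.length)).map (fun k => 2 * k + 1)))
      = (pvSums l).map (fun v => a + v) := by
    rw [List.map_map, pvSums, List.map_map]
    exact List.map_congr_left (fun k _ => pvMsum_odd a l k)
  have heq : List.map (pvMsum (a :: l))
        (List.map (fun k => 2 * k) (List.range (2 ^ l.length)) ++
          List.map (fun k => 2 * k + 1) (List.range (2 ^ l.length)))
      = pvSums l ++ (pvSums l).map (fun v => a + v) := by
    rw [List.map_append, h1, h2]
  have : pvSums (a :: l) = List.map (pvMsum (a :: l)) (List.range (2 * 2 ^ l.length)) := by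
    rw [pvSums, hpow]
  rw [this, ← heq]
  exact hperm

-- main A-side characterisation: the (max even, max odd) of all subset sums is pvSem
lemma pvMeo_sums : ∀ l : List Int, pvMeo (pvSums l) = (some (pvSem l).1, (pvSem l).2) := by
  intro l
  induction l with
  | nil => decide
  | cons a l ih =>
      rw [pvMeo_perm (pvSums_cons a l), pvMeo_append, ih]
      by_cases ha : a % 2 = 0
      · rw [pvMeo_map_even a ha, ih]
        cases h : (pvSem l).2 <;>
          simp [pvSem, pvUnit, pvComb, pvMerge, pvOmax, ha, h, Int.max_def] <;>
            split_ifs <;> omega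
      · rw [pvMeo_map_odd a ha, ih]
        cases h : (pvSem l).2 <;>
          simp [pvSem, pvUnit, pvComb, pvMerge, pvOmax, ha, h, Int.max_def] <;>
            split_ifs <;> omega

lemma pvComb_assoc (p q r : Int × Option Int) :
    pvComb (pvComb p q) r = pvComb p (pvComb q r) := by
  rcases p with ⟨a, b⟩; rcases q with ⟨c, d⟩; rcases r with ⟨e, f⟩
  cases b <;> cases d <;> cases f <;>
    simp [pvComb, pvMerge, pvOmax, Int.max_def] <;> (try split_ifs) <;> omega

lemma pvComb_unit_right (p : Int × Option Int) : pvComb p (0, none) = p := by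
  rcases p with ⟨a, b⟩
  cases b <;> simp [pvComb, pvMerge]

lemma pvBstep_eq (p : Int × Option Int) (x : Int) :
    (if PySem.Int.mod x 2 = 0 then
        (max p.1 (p.1 + x),
         match p.2 with
         | none => none
         | some m => some (max m (m + x)))
      else
        ((match p.2 with
          | none => p.1
          | some m => max p.1 (m + x)),
         some (match p.2 with
               | none => p.1 + x
               | some m => max (p.1 + x) m)))
    = pvComb p (pvUnit x) := by
  have hmod : PySem.Int.mod x 2 = x % 2 := PySem.Int.mod_eq_emod_of_pos (by omega)
  rw [hmod]
  rcases p with ⟨a, b⟩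
  by_cases hx : x % 2 = 0 <;> cases b <;>
    simp [pvComb, pvUnit, pvMerge, pvOmax, hx] <;>
      simp [Int.max_def] <;> (try split_ifs) <;> (try rfl) <;> omega

lemma pvBfold : ∀ (l : List Int) (p : Int × Option Int),
    l.foldl (fun (p : Int × Option Int) x =>
      if PySem.Int.mod x 2 = 0 then
        (max p.1 (p.1 + x),
         match p.2 with
         | none => none
         | some m => some (max m (m + x)))
      else
        ((match p.2 with
          | none => p.1
          | some m => max p.1 (m + x)),
         some (match p.2 with
               | none => p.1 + x
               | some m => max (p.1 + x) m))) p
    = pvComb p (pvSem l) := by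
  intro l
  induction l with
  | nil => intro p; exact (pvComb_unit_right p).symm
  | cons a l ih =>
      intro p
      rw [List.foldl_cons, ih, pvBstep_eq, pvComb_assoc]
      rfl

lemma pvSem_fst_nonneg : ∀ l : List Int, 0 ≤ (pvSem l).1 := by
  intro l
  induction l with
  | nil => simp [pvSem]
  | cons a l ih =>
      by_cases ha : a % 2 = 0 <;> cases h : (pvSem l).2 <;>
        simp [pvSem, pvUnit, pvComb, ha, h] <;> omega

lemma pvAlt_eq_sem (arr : List Int) : max_even_sum_alt arr = (pvSem arr).1 := by
  unfold max_even_sum_alt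
  rw [pvBfold]
  cases h : (pvSem arr).2 <;> simp [pvComb, pvMerge, h]

lemma pvShift (j : Nat) : (1 : Int) <<< j = ((2 ^ j : Nat) : Int) := by
  simp [Int.shiftLeft_eq]

-- same fact for the homogeneous Int-shift the port's '1 <<< i.toNat' elaborates to
lemma pvShiftH (j : Nat) : ((1 : Int) <<< ((j : Int))) = ((2 ^ j : Nat) : Int) := by
  have h : ((1 : Int) <<< ((j : Int))) = ((1 : Int) <<< j) := Int.shiftLeft_natCast 1 j
  rw [h]
  simp [Int.shiftLeft_eq]

lemma pvBit (m j : Nat) :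
    (PySem.Int.band (m : Int) ((1 : Int) <<< ((j : Int))) ≠ 0) ↔ m.testBit j := by
  rw [pvShiftH j, PySem.Int.band_natCast]
  rw [Nat.and_two_pow]
  cases h : m.testBit j <;> simp

-- the whole body of A on a nonempty list equals pvG over all subset sums
lemma pvA_eq_g (arr : List Int) (h : arr ≠ []) :
    max_even_sum arr = pvG 0 (pvSums arr) := by
  unfold max_even_sum
  rw [if_neg h]
  have hn1 : 0 < 2 ^ arr.length := Nat.two_pow_pos arr.length
  have hcast : ((2 ^ arr.length : Nat) : Int) - 1 = ((2 ^ arr.length - 1 : Nat) : Int) := by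
    omega
  rw [pvShift arr.length, PySem.List.pyRange_one 1 ((2 ^ arr.length : Nat) : Int), hcast,
    Int.toNat_natCast, List.foldl_map]
  -- pvG over all subset sums = the same fold over the nonzero masks 1+k, k < 2^n - 1
  have hsums : pvSums arr
      = 0 :: (List.range (2 ^ arr.length - 1)).map (fun k => pvMsum arr (1 + k)) := by
    rw [pvSums]
    have h2 : 2 ^ arr.length = (2 ^ arr.length - 1) + 1 := by omega
    rw [h2, List.range_succ_eq_map, List.map_cons, List.map_map, pvMsum_zero]
    congr 1
    exact List.map_congr_left (fun k _ => by
      simp [Function.comp, Nat.succ_eq_add_one, Nat.add_comm])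
  have h00 : pvG 0 (0 :: (List.range (2 ^ arr.length - 1)).map (fun k => pvMsum arr (1 + k)))
      = pvG 0 ((List.range (2 ^ arr.length - 1)).map (fun k => pvMsum arr (1 + k))) := by
    show pvG (if (0:Int) % 2 = 0 ∧ (0:Int) > (0:Int) then (0:Int) else (0:Int))
        ((List.range (2 ^ arr.length - 1)).map (fun k => pvMsum arr (1 + k))) = _
    norm_num
  rw [hsums, h00, pvG, List.foldl_map]
  apply PySem.List.foldl_congr_mem
  intro acc k _
  dsimp only
  have hmask : (1 + (k : Int)) = ((1 + k : Nat) : Int) := by push_cast; ring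
  have hinner :
      (PySem.List.pyRange 0 (arr.length : Int) 1).foldl (fun c i =>
        if PySem.Int.band (1 + (k : Int)) ((1:Int) <<< i.toNat) ≠ 0
        then c + PySem.List.pyGetD arr i 0 else c) 0 = pvMsum arr (1 + k) := by
    rw [PySem.List.pyRange_zero_nat, List.foldl_map]
    have hpv := pvInner arr (1 + k) 0
    rw [zero_add] at hpv
    rw [← hpv]
    apply PySem.List.foldl_congr_mem
    intro c j _
    dsimp only
    rw [hmask]
    simp only [pvBit, Int.toNat_natCast, PySem.List.pyGetD_natCast]
  rw [hinner, PySem.Int.mod_eq_emod_of_pos (a := pvMsum arr (1 + k)) (by omega)]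

-- ===== VERDICT (by name: the statement is the Claim_ definition above) =====
theorem max_even_sum_spec : Claim_equal_max_even_sum := by
  intro arr _
  show max_even_sum arr = max_even_sum_alt arr
  rw [pvAlt_eq_sem]
  by_cases h : arr = []
  · subst h; rfl
  · rw [pvA_eq_g arr h, pvG_char, pvMeo_sums]
    show max 0 (pvSem arr).1 = (pvSem arr).1
    exact max_eq_right (pvSem_fst_nonneg arr)
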